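-- pv_equiv track=rewrite | github.com/aneeshk1412/ltl-cegis | cegis_dtree_minigrid.py | get_stem_and_loop
-- ===== SOURCE A (Python) =====
-- def get_stem_and_loop(trace):
--     hashes = [str(env) for env, _, _ in trace]
--     for i, x in enumerate(hashes):
--         try:
--             idx = hashes[i + 1:].index(x) + i + 1
--             return trace[:i], trace[i:idx]
--         except ValueError:
--             continue
--     return trace, None
-- ===== SOURCE B (Python) =====
-- def get_stem_and_loop(trace):
--     keys = [str(env) for env, _, _ in trace]
--     last = {}
--     nxt = []
--     for i in range(len(keys) - 1, -1, -1):
--         k = keys[i]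
--         nxt.append(last.get(k))
--         last[k] = i
--     nxt.reverse()
--     for i, j in enumerate(nxt):
--         if j is not None:
--             return trace[:i], trace[i:j]
--     return trace, None
-- ===== Notes on version B (the rewrite author's own statement) =====
-- stated objective: faster
-- what changed: Replaces the per-index scan of the whole suffix (hashes[i+1:].index(x)) by a single right-to-left pass that records in a dict the next occurrence index of each env, then one left-to-right scan for the first index with a later repeat.
import Mathlib
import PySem

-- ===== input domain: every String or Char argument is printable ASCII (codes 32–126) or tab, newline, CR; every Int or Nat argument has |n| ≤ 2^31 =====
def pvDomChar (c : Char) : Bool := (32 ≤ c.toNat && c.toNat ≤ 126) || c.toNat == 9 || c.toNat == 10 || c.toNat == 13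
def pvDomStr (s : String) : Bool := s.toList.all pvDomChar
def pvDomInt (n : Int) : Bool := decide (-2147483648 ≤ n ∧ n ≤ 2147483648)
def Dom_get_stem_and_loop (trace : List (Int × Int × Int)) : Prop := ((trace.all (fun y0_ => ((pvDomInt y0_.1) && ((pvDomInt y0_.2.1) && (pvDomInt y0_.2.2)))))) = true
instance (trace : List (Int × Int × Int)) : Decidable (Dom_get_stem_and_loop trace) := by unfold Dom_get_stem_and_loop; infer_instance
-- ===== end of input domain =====

-- B replaces A's quadratic suffix scan by one right-to-left dict pass recording next occurrences
-- plus one left-to-right scan (objective: faster, asymptotic).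

-- ===== PORT A =====
-- 'for i, x in enumerate(hashes)': structural recursion over the remaining suffix with index i.
def pvAGo (trace : List (Int × Int × Int)) (hashes : List String) (i : Nat) :
    List String → (List (Int × Int × Int)) × (Option (List (Int × Int × Int)))
  | [] => (trace, none)
  | x :: rest =>
    match PySem.List.index? (PySem.List.slice hashes (some ((i : Int) + 1)) none) x with
    | some m => (PySem.List.slice trace none (some (i : Int)),
                 some (PySem.List.slice trace (some (i : Int)) (some ((m : Int) + (i : Int) + 1))))
    | none => pvAGo trace hashes (i + 1) rest

def get_stem_and_loop (trace : List (Int × Int × Int)) :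
    (List (Int × Int × Int)) × (Option (List (Int × Int × Int))) :=
  let hashes := trace.map (fun t => PySem.Int.toStr t.1)
  pvAGo trace hashes 0 hashes

-- ===== PORT B =====
-- right-to-left pass: returns (last, nxt) where nxt[rel k] = last.get(keys[k]) before inserting k.
def pvBBuild (i : Nat) : List String → PySem.Dict String Int × List (Option Int)
  | [] => (PySem.Dict.empty, [])
  | k :: rest =>
    let (last, nxt) := pvBBuild (i + 1) rest
    (last.insert k (i : Int), last.get? k :: nxt)

-- left-to-right scan of nxt for the first index with a later repeat.
def pvBScan (trace : List (Int × Int × Int)) (i : Nat) :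
    List (Option Int) → (List (Int × Int × Int)) × (Option (List (Int × Int × Int)))
  | [] => (trace, none)
  | none :: rest => pvBScan trace (i + 1) rest
  | some j :: _ => (PySem.List.slice trace none (some (i : Int)),
                    some (PySem.List.slice trace (some (i : Int)) (some j)))

def get_stem_and_loop_alt (trace : List (Int × Int × Int)) :
    (List (Int × Int × Int)) × (Option (List (Int × Int × Int))) :=
  let keys := trace.map (fun t => PySem.Int.toStr t.1)
  pvBScan trace 0 (pvBBuild 0 keys).2

-- ===== PRECONDITION & SPEC =====
def Spec_get_stem_and_loop (trace : List (Int × Int × Int)) (out : (List (Int × Int × Int)) × (Option (List (Int × Int × Int)))) : Prop := out = get_stem_and_loop_alt trace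
instance (trace : List (Int × Int × Int)) (out : (List (Int × Int × Int)) × (Option (List (Int × Int × Int)))) : Decidable (Spec_get_stem_and_loop trace out) := by unfold Spec_get_stem_and_loop; infer_instance

-- ===== CLAIM (what is proved, stated in full; the proofs are below) =====
def Claim_equal_get_stem_and_loop : Prop := ∀ (trace : List (Int × Int × Int)), Dom_get_stem_and_loop trace → Spec_get_stem_and_loop trace (get_stem_and_loop trace)

-- ===== LEMMAS AND PROOFS =====

-- the dict built by pvBBuild maps a key to i + (its first occurrence index in xs)
lemma pvBBuild_get (xs : List String) : ∀ (i : Nat) (y : String),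
    (pvBBuild i xs).1.get? y = (PySem.List.index? xs y).map (fun m => ((i + m : Nat) : Int)) := by
  induction xs with
  | nil => intro i y; simp [pvBBuild, PySem.List.index?_eq_idxOf?]
  | cons x rest ih =>
    intro i y
    simp only [pvBBuild]
    by_cases h : y = x
    · subst h
      rw [PySem.Dict.get?_insert_self, PySem.List.index?_cons_self]
      simp
    · rw [PySem.Dict.get?_insert_of_ne _ _ h, ih (i+1) y,
          PySem.List.index?_cons_of_ne _ (Ne.symm h)]
      cases PySem.List.index? rest y with
      | none => rfl
      | some m => simp; omega

lemma pvBBuild_snd_cons (i : Nat) (x : String) (rest : List String) :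
    (pvBBuild i (x :: rest)).2 = (pvBBuild (i+1) rest).1.get? x :: (pvBBuild (i+1) rest).2 := by
  simp [pvBBuild]

-- main alignment: A's scan over the suffix equals B's scan over pvBBuild's nxt list
lemma pvGo_eq (suffix : List String) : ∀ (i : Nat) (trace : List (Int × Int × Int))
    (hashes : List String), hashes.drop i = suffix →
    pvAGo trace hashes i suffix = pvBScan trace i (pvBBuild i suffix).2 := by
  induction suffix with
  | nil => intro i trace hashes _; simp [pvAGo, pvBBuild, pvBScan]
  | cons x rest ih =>
    intro i trace hashes hdrop
    have hrest : hashes.drop (i + 1) = rest := by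
      rw [← List.drop_drop, hdrop]; simp
    have hslice : PySem.List.slice hashes (some ((i : Int) + 1)) none = rest := by
      have : ((i : Int) + 1) = (((i + 1 : Nat)) : Int) := by push_cast; ring
      rw [this, PySem.List.slice_from_natCast, hrest]
    rw [pvBBuild_snd_cons, pvBBuild_get]
    simp only [pvAGo, hslice]
    cases hidx : PySem.List.index? rest x with
    | none => simp only [Option.map_none, pvBScan]; exact ih (i+1) trace hashes hrest
    | some m =>
      simp only [Option.map_some, pvBScan]
      have : (m : Int) + (i : Int) + 1 = (((i + 1 + m : Nat)) : Int) := by push_cast; ring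
      rw [this]

-- ===== VERDICT (by name: the statement is the Claim_ definition above) =====
theorem get_stem_and_loop_spec : Claim_equal_get_stem_and_loop := by
  intro trace _
  unfold Spec_get_stem_and_loop get_stem_and_loop get_stem_and_loop_alt
  exact pvGo_eq _ 0 trace _ (by simp)
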